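-- pv_equiv track=rewrite | github.com/Alan-Echo/openclaw-techhorizon-skill | techhorizon/processor.py | translate_to_chinese
-- ===== SOURCE A (Python) =====
-- def translate_to_chinese(text: str) -> str:
--     """翻译英文为中文（模拟实现）"""
--     # TODO: 集成实际的翻译API
--     # 这里返回模拟翻译结果
--     if not text.strip():
--         return "无描述信息"
--
--     # 简单的模拟翻译（实际应该调用翻译服务）
--     translations = {
--         "Sample GitHub Project": "示例GitHub项目",
--         "This is a sample GitHub project description": "这是一个示例GitHub项目描述",
--         "Hacker News discussion": "Hacker News讨论",
--         "Artificial Intelligence": "人工智能",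
--         "Machine Learning": "机器学习",
--         "Security vulnerability": "安全漏洞",
--         "New release": "新版本发布"
--     }
--
--     translated = text
--     for en, zh in translations.items():
--         translated = translated.replace(en, zh)
--
--     return translated if translated != text else f"[翻译] {text}"
-- ===== SOURCE B (Python) =====
-- _PAIRS = [
--     ("Sample GitHub Project", "示例GitHub项目"),
--     ("This is a sample GitHub project description", "这是一个示例GitHub项目描述"),
--     ("Hacker News discussion", "Hacker News讨论"),
--     ("Artificial Intelligence", "人工智能"),
--     ("Machine Learning", "机器学习"),
--     ("Security vulnerability", "安全漏洞"),
--     ("New release", "新版本发布"),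
-- ]
--
--
-- def translate_to_chinese(text: str) -> str:
--     """翻译英文为中文（模拟实现）：单次从左到右扫描，而非对每个词条整串替换"""
--     if not text.strip():
--         return "无描述信息"
--
--     out = []
--     i = 0
--     n = len(text)
--     while i < n:
--         for en, zh in _PAIRS:
--             if text.startswith(en, i):
--                 out.append(zh)
--                 i += len(en)
--                 break
--         else:
--             out.append(text[i])
--             i += 1
--
--     translated = "".join(out)
--     return translated if translated != text else f"[翻译] {text}"
-- ===== Notes on version B (the rewrite author's own statement) =====
-- stated objective: alternative
-- what changed: A runs seven sequential whole-string str.replace passes (one per dictionary entry); B makes a single left-to-right scan that at each position tries the keys in dict order, emitting the translation and jumping past the match or copying one character.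
import Mathlib
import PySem

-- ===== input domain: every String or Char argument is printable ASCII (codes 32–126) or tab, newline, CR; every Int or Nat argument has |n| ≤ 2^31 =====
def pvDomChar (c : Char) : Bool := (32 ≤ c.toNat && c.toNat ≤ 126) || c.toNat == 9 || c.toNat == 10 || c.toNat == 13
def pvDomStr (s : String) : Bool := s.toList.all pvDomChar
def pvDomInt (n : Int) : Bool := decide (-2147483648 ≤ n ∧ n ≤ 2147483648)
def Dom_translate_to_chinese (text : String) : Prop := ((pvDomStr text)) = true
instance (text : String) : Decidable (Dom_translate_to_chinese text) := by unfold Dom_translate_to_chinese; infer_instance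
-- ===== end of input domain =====

-- B replaces A's seven sequential whole-string str.replace passes by one left-to-right scan that
-- tries the keys at each position (objective: alternative single-pass algorithm, same return value).

-- ===== PORT A =====
-- the translations dict, in insertion order
def pvTransA : List (String × String) :=
  [("Sample GitHub Project", "示例GitHub项目"),
   ("This is a sample GitHub project description", "这是一个示例GitHub项目描述"),
   ("Hacker News discussion", "Hacker News讨论"),
   ("Artificial Intelligence", "人工智能"),
   ("Machine Learning", "机器学习"),
   ("Security vulnerability", "安全漏洞"),
   ("New release", "新版本发布")]

def translate_to_chinese (text : String) : String :=
  if PySem.Str.strip text = "" then "无描述信息"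
  else
    -- for en, zh in translations.items(): translated = translated.replace(en, zh)
    let translated := pvTransA.foldl (fun acc p => PySem.Str.replace acc p.1 p.2) text
    if translated ≠ text then translated else String.ofList ("[翻译] ".toList ++ text.toList)

-- ===== PORT B =====
-- the same pairs, held as char lists for the scan
def pvPairsB : List (List Char × List Char) :=
  [("Sample GitHub Project".toList, "示例GitHub项目".toList),
   ("This is a sample GitHub project description".toList, "这是一个示例GitHub项目描述".toList),
   ("Hacker News discussion".toList, "Hacker News讨论".toList),
   ("Artificial Intelligence".toList, "人工智能".toList),
   ("Machine Learning".toList, "机器学习".toList),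
   ("Security vulnerability".toList, "安全漏洞".toList),
   ("New release".toList, "新版本发布".toList)]

-- the inner `for en, zh in _PAIRS: if text.startswith(en, i)` loop: first pair whose key starts here
def pvTry (K : List (List Char × List Char)) (cs : List Char) : Option (List Char × List Char) :=
  match K with
  | [] => none
  | kv :: rest => if kv.1.isPrefixOf cs then some kv else pvTry rest cs

-- the single left-to-right pass of Source B (emit the value and jump, or copy one char)
def pvScan (K : List (List Char × List Char)) : List Char → List Char
  | [] => []
  | c :: t =>
    match pvTry K (c :: t) with
    | some kv => kv.2 ++ pvScan K (t.drop (kv.1.length - 1))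
    | none => c :: pvScan K t
  termination_by cs => cs.length
  decreasing_by
  all_goals simp

def translate_to_chinese_alt (text : String) : String :=
  if PySem.Str.strip text = "" then "无描述信息"
  else
    let translated := String.ofList (pvScan pvPairsB text.toList)
    if translated ≠ text then translated else String.ofList ("[翻译] ".toList ++ text.toList)

-- ===== PRECONDITION & SPEC =====
def Spec_translate_to_chinese (text : String) (out : String) : Prop := out = translate_to_chinese_alt text
instance (text : String) (out : String) : Decidable (Spec_translate_to_chinese text out) := by unfold Spec_translate_to_chinese; infer_instance

-- ===== CLAIM (what is proved, stated in full; the proofs are below) =====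
def Claim_equal_translate_to_chinese : Prop := ∀ (text : String), Dom_translate_to_chinese text → Spec_translate_to_chinese text (translate_to_chinese text)

-- ===== LEMMAS AND PROOFS =====

-- proof-only model of Python's s.replace(old, new) for a nonempty old, as a clean recursion
def pvRepl (o : Char) (ot newv : List Char) : List Char → List Char
  | [] => []
  | c :: t =>
    if (o :: ot).isPrefixOf (c :: t) then newv ++ pvRepl o ot newv (t.drop ot.length)
    else c :: pvRepl o ot newv t
  termination_by cs => cs.length
  decreasing_by
  all_goals simp

lemma pvScan_nil_cs (K : List (List Char × List Char)) : pvScan K [] = [] := by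
  rw [pvScan]

lemma pvScan_cons_some {K : List (List Char × List Char)} {c : Char} {t : List Char} {kv}
    (h : pvTry K (c :: t) = some kv) :
    pvScan K (c :: t) = kv.2 ++ pvScan K (t.drop (kv.1.length - 1)) := by
  rw [pvScan, h]

lemma pvScan_cons_none {K : List (List Char × List Char)} {c : Char} {t : List Char}
    (h : pvTry K (c :: t) = none) :
    pvScan K (c :: t) = c :: pvScan K t := by
  rw [pvScan, h]

lemma pvRepl_nil (o : Char) (ot newv : List Char) : pvRepl o ot newv [] = [] := by
  rw [pvRepl]

lemma pvRepl_cons_pos {o : Char} {ot : List Char} (newv : List Char) {c : Char} {t : List Char}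
    (h : (o :: ot) <+: (c :: t)) :
    pvRepl o ot newv (c :: t) = newv ++ pvRepl o ot newv (t.drop ot.length) := by
  rw [pvRepl]
  simp [List.isPrefixOf_iff_prefix, h]

lemma pvRepl_cons_neg {o : Char} {ot : List Char} (newv : List Char) {c : Char} {t : List Char}
    (h : ¬ (o :: ot) <+: (c :: t)) :
    pvRepl o ot newv (c :: t) = c :: pvRepl o ot newv t := by
  rw [pvRepl]
  simp [List.isPrefixOf_iff_prefix, h]

lemma pvGo_zero (k newv l acc : List Char) :
    PySem.Chars.replace.go k newv 0 l acc = acc.reverse ++ l := rfl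

lemma pvGo_succ_nil (k newv : List Char) (n : Nat) (acc : List Char) :
    PySem.Chars.replace.go k newv (n + 1) [] acc = acc.reverse := rfl

lemma pvGo_succ_cons (k newv : List Char) (n : Nat) (c : Char) (t acc : List Char) :
    PySem.Chars.replace.go k newv (n + 1) (c :: t) acc =
      if k.isPrefixOf (c :: t) then
        PySem.Chars.replace.go k newv n ((c :: t).drop k.length) (newv.reverse ++ acc)
      else PySem.Chars.replace.go k newv n t (c :: acc) := rfl

lemma pvRepl_go (o : Char) (ot newv : List Char) :
    ∀ fuel (l acc : List Char), l.length ≤ fuel →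
      PySem.Chars.replace.go (o :: ot) newv fuel l acc = acc.reverse ++ pvRepl o ot newv l := by
  intro fuel
  induction fuel with
  | zero =>
    intro l acc h
    have hl : l = [] := by cases l with
      | nil => rfl
      | cons c t => simp at h
    subst hl
    rw [pvGo_zero, pvRepl_nil]
  | succ n ih =>
    intro l acc h
    cases l with
    | nil =>
      rw [pvGo_succ_nil, pvRepl_nil]
      simp
    | cons c t =>
      rw [pvGo_succ_cons]
      by_cases hp : (o :: ot) <+: (c :: t)
      · have hp' : (o :: ot).isPrefixOf (c :: t) = true := List.isPrefixOf_iff_prefix.mpr hp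
        simp only [hp', if_true]
        have hdrop : (c :: t).drop (o :: ot).length = t.drop ot.length := by
          simp [List.drop_succ_cons]
        rw [hdrop, ih (t.drop ot.length) (newv.reverse ++ acc)
              (by simp at h ⊢; omega)]
        rw [pvRepl_cons_pos newv hp]
        simp
      · have hp' : ¬ ((o :: ot).isPrefixOf (c :: t) = true) :=
          fun hb => hp (List.isPrefixOf_iff_prefix.mp hb)
        rw [if_neg hp']
        rw [ih t (c :: acc) (by simp at h ⊢; omega)]
        rw [pvRepl_cons_neg newv hp]
        simp

lemma pvReplace_eq (o : Char) (ot newv s : List Char) :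
    PySem.Chars.replace s (o :: ot) newv = pvRepl o ot newv s := by
  rw [PySem.Chars.replace]
  simp only [List.isEmpty_cons, if_false, Bool.false_eq_true]
  rw [pvRepl_go o ot newv s.length s [] le_rfl]
  simp

lemma pvTry_none_iff (K : List (List Char × List Char)) (cs : List Char) :
    pvTry K cs = none ↔ ∀ kv ∈ K, ¬ kv.1 <+: cs := by
  induction K with
  | nil => simp [pvTry]
  | cons kv rest ih =>
    by_cases h : kv.1 <+: cs
    · simp [pvTry, List.isPrefixOf_iff_prefix, h]
    · simp [pvTry, List.isPrefixOf_iff_prefix, h, ih]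

lemma pvTry_some_mem {K : List (List Char × List Char)} {cs : List Char} {kv}
    (h : pvTry K cs = some kv) : kv ∈ K ∧ kv.1 <+: cs := by
  induction K with
  | nil => simp [pvTry] at h
  | cons kv' rest ih =>
    by_cases h' : kv'.1 <+: cs
    · simp [pvTry, List.isPrefixOf_iff_prefix, h'] at h
      subst h; exact ⟨List.mem_cons_self, h'⟩
    · simp [pvTry, List.isPrefixOf_iff_prefix, h'] at h
      obtain ⟨hm, hp⟩ := ih h
      exact ⟨List.mem_cons_of_mem _ hm, hp⟩

lemma pvTry_append_none {K L : List (List Char × List Char)} {cs : List Char}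
    (h : pvTry K cs = none) : pvTry (K ++ L) cs = pvTry L cs := by
  induction K with
  | nil => simp
  | cons kv rest ih =>
    by_cases h' : kv.1 <+: cs
    · simp [pvTry, List.isPrefixOf_iff_prefix, h'] at h
    · simp [pvTry, List.isPrefixOf_iff_prefix, h'] at h ⊢
      exact ih h

lemma pvTry_append_some {K L : List (List Char × List Char)} {cs : List Char} {kv}
    (h : pvTry K cs = some kv) : pvTry (K ++ L) cs = some kv := by
  induction K with
  | nil => simp [pvTry] at h
  | cons kv' rest ih =>
    by_cases h' : kv'.1 <+: cs
    · simp [pvTry, List.isPrefixOf_iff_prefix, h'] at h ⊢; exact h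
    · simp [pvTry, List.isPrefixOf_iff_prefix, h'] at h ⊢; exact ih h

-- the scan copies a region in which no key matches at any offset
lemma pvScanPass (K : List (List Char × List Char)) :
    ∀ a b : List Char, (∀ p, p < a.length → pvTry K (a.drop p ++ b) = none) →
      pvScan K (a ++ b) = a ++ pvScan K b := by
  intro a
  induction a with
  | nil => intro b _; simp
  | cons c a' ih =>
    intro b h
    have h0 : pvTry K (c :: (a' ++ b)) = none := by
      have := h 0 (by simp)
      simpa using this
    rw [List.cons_append, pvScan_cons_none h0]
    rw [ih b (fun p hp => by simpa using h (p + 1) (by simp; omega))]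
    rfl

-- replace passes over a block none of whose suffixes interacts with the needle
lemma pvReplPass (o : Char) (ot newv : List Char) :
    ∀ a b : List Char,
      (∀ p, p < a.length → ¬ (a.drop p <+: (o :: ot)) ∧ ¬ ((o :: ot) <+: a.drop p)) →
      pvRepl o ot newv (a ++ b) = a ++ pvRepl o ot newv b := by
  intro a
  induction a with
  | nil => intro b _; simp
  | cons c a' ih =>
    intro b h
    have hnp : ¬ (o :: ot) <+: (c :: (a' ++ b)) := by
      intro hpre
      rcases List.prefix_or_prefix_of_prefix hpre (List.prefix_append (c :: a') b) with h1 | h2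
      · exact (h 0 (by simp)).2 (by simpa using h1)
      · exact (h 0 (by simp)).1 (by simpa using h2)
    rw [List.cons_append, pvRepl_cons_neg newv hnp]
    rw [ih b (fun p hp => by simpa using h (p + 1) (by simp; omega))]
    rfl

-- the scan never creates a new occurrence of a key at the front of its output
lemma pvNoCreate (K : List (List Char × List Char)) :
    ∀ (u k : List Char),
      (∀ p, p < k.length → ∀ kv ∈ K, ¬ (k.drop p <+: kv.2) ∧ ¬ (kv.2 <+: k.drop p)) →
      k <+: pvScan K u → k <+: u := by
  suffices h : ∀ n (u k : List Char), u.length ≤ n →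
      (∀ p, p < k.length → ∀ kv ∈ K, ¬ (k.drop p <+: kv.2) ∧ ¬ (kv.2 <+: k.drop p)) →
      k <+: pvScan K u → k <+: u by
    exact fun u k hn hp => h u.length u k le_rfl hn hp
  intro n
  induction n with
  | zero =>
    intro u k hu _ hpre
    have hu' : u = [] := by cases u with
      | nil => rfl
      | cons c t => simp at hu
    subst hu'
    simpa [pvScan_nil_cs] using hpre
  | succ n ih =>
    intro u k hu HN hpre
    cases u with
    | nil => simpa [pvScan_nil_cs] using hpre
    | cons c t =>
      cases htry : pvTry K (c :: t) with
      | some kv =>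
        rw [pvScan_cons_some htry] at hpre
        cases k with
        | nil => exact List.nil_prefix
        | cons kc k' =>
          exfalso
          rcases List.prefix_or_prefix_of_prefix hpre (List.prefix_append kv.2 _) with h1 | h2
          · exact (HN 0 (by simp) kv (pvTry_some_mem htry).1).1 (by simpa using h1)
          · exact (HN 0 (by simp) kv (pvTry_some_mem htry).1).2 (by simpa using h2)
      | none =>
        rw [pvScan_cons_none htry] at hpre
        cases k with
        | nil => exact List.nil_prefix
        | cons kc k' =>
          rw [List.cons_prefix_cons] at hpre
          obtain ⟨hc, hk'⟩ := hpre
          have hk't : k' <+: t := by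
            refine ih t k' (by simp at hu; omega) ?_ hk'
            intro p hp kv hm
            have := HN (p + 1) (by simp; omega) kv hm
            simpa [List.drop_succ_cons] using this
          subst hc
          exact List.cons_prefix_cons.mpr ⟨rfl, hk't⟩

-- main step: one more replace pass equals the scan with one more key appended
lemma pvStep (K : List (List Char × List Char)) (o : Char) (ot newv : List Char)
    (H1 : ∀ kv ∈ K, ∀ p, p < kv.2.length →
            ¬ (kv.2.drop p <+: (o :: ot)) ∧ ¬ ((o :: ot) <+: kv.2.drop p))
    (HN : ∀ p, p < (o :: ot).length → ∀ kv ∈ K,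
            ¬ ((o :: ot).drop p <+: kv.2) ∧ ¬ (kv.2 <+: (o :: ot).drop p))
    (H3 : ∀ kv ∈ K, ∀ p, p < (o :: ot).length → 0 < p →
            ¬ (kv.1 <+: (o :: ot).drop p) ∧ ¬ ((o :: ot).drop p <+: kv.1)) :
    ∀ u : List Char, pvRepl o ot newv (pvScan K u) = pvScan (K ++ [(o :: ot, newv)]) u := by
  suffices h : ∀ n (u : List Char), u.length ≤ n →
      pvRepl o ot newv (pvScan K u) = pvScan (K ++ [(o :: ot, newv)]) u by
    exact fun u => h u.length u le_rfl
  intro n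
  induction n with
  | zero =>
    intro u hu
    have hu' : u = [] := by cases u with
      | nil => rfl
      | cons c t => simp at hu
    subst hu'
    rw [pvScan_nil_cs, pvScan_nil_cs, pvRepl_nil]
  | succ n ih =>
    intro u hu
    cases u with
    | nil => rw [pvScan_nil_cs, pvScan_nil_cs, pvRepl_nil]
    | cons c t =>
      have ht : t.length ≤ n := by simp at hu; omega
      cases htry : pvTry K (c :: t) with
      | some kv =>
        have hmem := (pvTry_some_mem htry).1
        rw [pvScan_cons_some htry, pvScan_cons_some (pvTry_append_some htry)]
        rw [pvReplPass o ot newv kv.2 _ (fun p hp => H1 kv hmem p hp)]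
        rw [ih _ (by have := List.length_drop (l := t) (i := kv.1.length - 1); omega)]
      | none =>
        by_cases hk : (o :: ot) <+: (c :: t)
        · obtain ⟨r, hr⟩ := hk
          have hct : o = c ∧ ot ++ r = t := by
            rw [List.cons_append] at hr
            injection hr with h1 h2
            exact ⟨h1, h2⟩
          have hpref : (o :: ot).isPrefixOf (c :: t) = true :=
            List.isPrefixOf_iff_prefix.mpr ⟨r, hr⟩
          have htry' : pvTry (K ++ [(o :: ot, newv)]) (c :: t) = some (o :: ot, newv) := by
            rw [pvTry_append_none htry]
            simp [pvTry, hpref]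
          rw [pvScan_cons_some htry']
          have hdrop : t.drop ((o :: ot).length - 1) = r := by
            rw [← hct.2]
            simp
          rw [hdrop]
          rw [← hr]
          have hpass : pvScan K ((o :: ot) ++ r) = (o :: ot) ++ pvScan K r := by
            refine pvScanPass K (o :: ot) r ?_
            intro p hp
            rcases Nat.eq_zero_or_pos p with hp0 | hppos
            · subst hp0
              simpa [hr] using htry
            · rw [pvTry_none_iff]
              intro kv hm hpre
              rcases List.prefix_or_prefix_of_prefix hpre
                  (List.prefix_append ((o :: ot).drop p) r) with h1 | h2
              · exact (H3 kv hm p hp hppos).1 h1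
              · exact (H3 kv hm p hp hppos).2 h2
          rw [hpass]
          have hhead : pvRepl o ot newv ((o :: ot) ++ pvScan K r) =
              newv ++ pvRepl o ot newv (pvScan K r) := by
            rw [List.cons_append,
                pvRepl_cons_pos newv (by rw [← List.cons_append]; exact List.prefix_append _ _)]
            rw [List.drop_left]
          rw [hhead]
          have hrlen : r.length ≤ n := by
            have := congrArg List.length hr
            simp at this hu
            omega
          rw [ih r hrlen]
        · have hpref : ¬ ((o :: ot).isPrefixOf (c :: t) = true) :=
            fun hb => hk (List.isPrefixOf_iff_prefix.mp hb)
          have htry' : pvTry (K ++ [(o :: ot, newv)]) (c :: t) = none := by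
            rw [pvTry_append_none htry]
            simp [pvTry, hpref]
          rw [pvScan_cons_none htry, pvScan_cons_none htry']
          have hnp : ¬ (o :: ot) <+: (c :: pvScan K t) := by
            intro hpre
            refine hk (pvNoCreate K (c :: t) (o :: ot) HN ?_)
            rw [pvScan_cons_none htry]
            exact hpre
          rw [pvRepl_cons_neg newv hnp]
          rw [ih t ht]

lemma pvScan_nil : ∀ u : List Char, pvScan [] u = u := by
  intro u
  induction u with
  | nil => rw [pvScan_nil_cs]
  | cons c t ih => rw [pvScan_cons_none rfl, ih]

lemma pvChain (cs : List Char) :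
    (pvTransA.foldl (fun acc p => PySem.Chars.replace acc p.1.toList p.2.toList) cs)
      = pvScan pvPairsB cs := by
  simp only [pvTransA, List.foldl]
  rw [show "Sample GitHub Project".toList = 'S' :: "ample GitHub Project".toList from by decide]
  rw [show "This is a sample GitHub project description".toList = 'T' :: "his is a sample GitHub project description".toList from by decide]
  rw [show "Hacker News discussion".toList = 'H' :: "acker News discussion".toList from by decide]
  rw [show "Artificial Intelligence".toList = 'A' :: "rtificial Intelligence".toList from by decide]
  rw [show "Machine Learning".toList = 'M' :: "achine Learning".toList from by decide]
  rw [show "Security vulnerability".toList = 'S' :: "ecurity vulnerability".toList from by decide]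
  rw [show "New release".toList = 'N' :: "ew release".toList from by decide]
  simp only [pvReplace_eq]
  conv_lhs => rw [← pvScan_nil cs]
  rw [(pvStep [] 'S' "ample GitHub Project".toList "示例GitHub项目".toList (by simp) (by simp) (by simp)) cs]
  simp only [List.nil_append]
  rw [(pvStep [('S' :: "ample GitHub Project".toList, "示例GitHub项目".toList)] 'T' "his is a sample GitHub project description".toList "这是一个示例GitHub项目描述".toList (by decide) (by decide) (by decide)) cs]
  simp only [List.cons_append, List.nil_append]
  rw [(pvStep [('S' :: "ample GitHub Project".toList, "示例GitHub项目".toList), ('T' :: "his is a sample GitHub project description".toList, "这是一个示例GitHub项目描述".toList)] 'H' "acker News discussion".toList "Hacker News讨论".toList (by decide) (by decide) (by decide)) cs]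
  simp only [List.cons_append, List.nil_append]
  rw [(pvStep [('S' :: "ample GitHub Project".toList, "示例GitHub项目".toList), ('T' :: "his is a sample GitHub project description".toList, "这是一个示例GitHub项目描述".toList), ('H' :: "acker News discussion".toList, "Hacker News讨论".toList)] 'A' "rtificial Intelligence".toList "人工智能".toList (by decide) (by decide) (by decide)) cs]
  simp only [List.cons_append, List.nil_append]
  rw [(pvStep [('S' :: "ample GitHub Project".toList, "示例GitHub项目".toList), ('T' :: "his is a sample GitHub project description".toList, "这是一个示例GitHub项目描述".toList), ('H' :: "acker News discussion".toList, "Hacker News讨论".toList), ('A' :: "rtificial Intelligence".toList, "人工智能".toList)] 'M' "achine Learning".toList "机器学习".toList (by decide) (by decide) (by decide)) cs]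
  simp only [List.cons_append, List.nil_append]
  rw [(pvStep [('S' :: "ample GitHub Project".toList, "示例GitHub项目".toList), ('T' :: "his is a sample GitHub project description".toList, "这是一个示例GitHub项目描述".toList), ('H' :: "acker News discussion".toList, "Hacker News讨论".toList), ('A' :: "rtificial Intelligence".toList, "人工智能".toList), ('M' :: "achine Learning".toList, "机器学习".toList)] 'S' "ecurity vulnerability".toList "安全漏洞".toList (by decide) (by decide) (by decide)) cs]
  simp only [List.cons_append, List.nil_append]
  rw [(pvStep [('S' :: "ample GitHub Project".toList, "示例GitHub项目".toList), ('T' :: "his is a sample GitHub project description".toList, "这是一个示例GitHub项目描述".toList), ('H' :: "acker News discussion".toList, "Hacker News讨论".toList), ('A' :: "rtificial Intelligence".toList, "人工智能".toList), ('M' :: "achine Learning".toList, "机器学习".toList), ('S' :: "ecurity vulnerability".toList, "安全漏洞".toList)] 'N' "ew release".toList "新版本发布".toList (by decide) (by decide) (by decide)) cs]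
  simp only [List.cons_append, List.nil_append]
  rw [show ([('S' :: "ample GitHub Project".toList, "示例GitHub项目".toList), ('T' :: "his is a sample GitHub project description".toList, "这是一个示例GitHub项目描述".toList), ('H' :: "acker News discussion".toList, "Hacker News讨论".toList), ('A' :: "rtificial Intelligence".toList, "人工智能".toList), ('M' :: "achine Learning".toList, "机器学习".toList), ('S' :: "ecurity vulnerability".toList, "安全漏洞".toList), ('N' :: "ew release".toList, "新版本发布".toList)] : List (List Char × List Char)) = pvPairsB from by decide]

-- ===== VERDICT (by name: the statement is the Claim_ definition above) =====
theorem translate_to_chinese_spec : Claim_equal_translate_to_chinese := by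
  intro text _
  unfold Spec_translate_to_chinese translate_to_chinese translate_to_chinese_alt
  by_cases hs : PySem.Str.strip text = ""
  · simp [hs]
  · simp only [hs, if_false]
    have key : pvTransA.foldl (fun acc p => PySem.Str.replace acc p.1 p.2) text
        = String.ofList (pvScan pvPairsB text.toList) := by
      have h := pvChain text.toList
      simp only [pvTransA, List.foldl] at h ⊢
      simp only [PySem.Str.replace, String.toList_ofList]
      rw [h]
    rw [key]
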